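-- pv_equiv track=rewrite | github.com/m1keezzy/advent-of-code-2022 | day6/day6.py | part2
-- ===== SOURCE A (Python) =====
-- def part2(datastream):
--     size = len(datastream)
--     for i in range(size):
--         if i + 14 > size:
--             return -1
--
--         key = set(datastream[i:i + 14])
--         if len(key) == 14:
--             return i + 14
--     return -1
-- ===== SOURCE B (Python) =====
-- def part2(datastream):
--     if len(datastream) < 14:
--         return -1
--     last_seen = {}
--     start = 0
--     for j, ch in enumerate(datastream):
--         p = last_seen.get(ch)
--         if p is not None and p >= start:
--             start = p + 1
--         last_seen[ch] = j
--         if j - start + 1 == 14: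
--             return j + 1
--     return -1
-- ===== Notes on version B (the rewrite author's own statement) =====
-- stated objective: faster
-- what changed: Replaces A's per-position rebuild of a 14-character set with a single sliding-window pass that keeps each character's last-seen index and jumps the window start past duplicates.
import Mathlib
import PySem

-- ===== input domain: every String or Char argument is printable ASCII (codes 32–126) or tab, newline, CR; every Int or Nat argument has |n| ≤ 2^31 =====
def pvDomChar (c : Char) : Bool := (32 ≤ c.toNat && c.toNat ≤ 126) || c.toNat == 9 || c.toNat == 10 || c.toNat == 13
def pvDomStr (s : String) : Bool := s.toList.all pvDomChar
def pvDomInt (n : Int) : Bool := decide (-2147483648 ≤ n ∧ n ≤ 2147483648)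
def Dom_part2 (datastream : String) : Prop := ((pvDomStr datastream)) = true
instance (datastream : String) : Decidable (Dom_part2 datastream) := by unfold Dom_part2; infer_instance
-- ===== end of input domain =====

-- B replaces A's per-position rebuild of a 14-character set by a single sliding-window
-- pass (last-seen index per character, window start jumping past duplicates); same result.

-- ===== PORT A =====
def part2Loop (cs : List Char) (size : Int) : List Int → Int
  | [] => -1
  | i :: rest =>
      if i + 14 > size then -1
      else
        let key := PySem.Set.ofList (PySem.List.slice cs (some i) (some (i + 14)))
        if key.length == 14 then i + 14 else part2Loop cs size rest

def part2 (datastream : String) : Int :=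
  let size : Int := PySem.Str.len datastream
  part2Loop datastream.toList size (PySem.List.pyRange 0 size 1)

-- ===== PORT B =====
def part2AltLoop (lastSeen : PySem.Dict Char Int) (start : Int) : List (Int × Char) → Int
  | [] => -1
  | (j, ch) :: rest =>
      let start' : Int :=
        match PySem.Dict.get? lastSeen ch with
        | some p => if p ≥ start then p + 1 else start
        | none => start
      let lastSeen' := PySem.Dict.insert lastSeen ch j
      if j - start' + 1 == 14 then j + 1 else part2AltLoop lastSeen' start' rest

def part2_alt (datastream : String) : Int :=
  if PySem.Str.len datastream < 14 then -1
  else part2AltLoop PySem.Dict.empty 0 (PySem.List.enumerate datastream.toList 0)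

-- ===== PRECONDITION & SPEC =====
def Spec_part2 (datastream : String) (out : Int) : Prop := out = part2_alt datastream
instance (datastream : String) (out : Int) : Decidable (Spec_part2 datastream out) := by unfold Spec_part2; infer_instance

-- ===== CLAIM (what is proved, stated in full; the proofs are below) =====
def Claim_equal_part2 : Prop := ∀ (datastream : String), Dom_part2 datastream → Spec_part2 datastream (part2 datastream)

-- ===== LEMMAS AND PROOFS =====

-- The brute-force scan, expressed over Nat indices: first i with a duplicate-free
-- 14-window at i (value i+14), else -1.
def firstOk (cs : List Char) (i : Nat) : Int :=
  if h : i + 14 ≤ cs.length then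
    if ((cs.drop i).take 14).Nodup then (i : Int) + 14 else firstOk cs (i + 1)
  else -1
termination_by cs.length - i
decreasing_by omega

-- index of the last occurrence of c among cs[0:j]
def lastOcc (cs : List Char) (c : Char) : Nat → Option Nat
  | 0 => none
  | j + 1 => if cs.getD j default = c then some j else lastOcc cs c j

lemma setOfList_sublist (xs : List Char) : (PySem.Set.ofList xs).Sublist xs := by
  induction xs with
  | nil => simp [PySem.Set.ofList_nil]
  | cons x xs ih =>
    rw [PySem.Set.ofList_cons]
    refine List.Sublist.cons₂ x (List.Sublist.trans ?_ ih)
    simp only [PySem.Set.discard]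
    exact List.filter_sublist

lemma setOfList_length_eq_iff (xs : List Char) :
    (PySem.Set.ofList xs).length = xs.length ↔ xs.Nodup := by
  constructor
  · intro h
    have := (setOfList_sublist xs).eq_of_length h
    rw [← this]
    exact PySem.Set.nodup_ofList xs
  · intro h
    rw [PySem.Set.ofList_eq_self_of_nodup xs h]

lemma partA_eq_firstOk (cs : List Char) (i : Nat) :
    part2Loop cs (cs.length : Int) (PySem.List.pyRange (i : Int) (cs.length : Int) 1)
      = firstOk cs i := by
  by_cases hi : i < cs.length
  · rw [PySem.List.pyRange_one_cons (by exact_mod_cast hi)]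
    rw [part2Loop]
    by_cases h14 : i + 14 ≤ cs.length
    · rw [if_neg (by omega)]
      have hsl : PySem.List.slice cs (some (i : Int)) (some ((i : Int) + 14))
          = (cs.drop i).take 14 := by
        exact_mod_cast PySem.List.slice_natCast_add cs i 14
      have hlen : ((cs.drop i).take 14).length = 14 := by
        simp only [List.length_take, List.length_drop]
        omega
      by_cases hnd : ((cs.drop i).take 14).Nodup
      · have hkey : (PySem.Set.ofList ((cs.drop i).take 14)).length = 14 := by
          rw [setOfList_length_eq_iff _ |>.mpr hnd, hlen]
        rw [firstOk, dif_pos h14, if_pos hnd]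
        simp only [hsl, hkey]
        rfl
      · have hkey : (PySem.Set.ofList ((cs.drop i).take 14)).length ≠ 14 := by
          intro hc
          exact hnd ((setOfList_length_eq_iff _).mp (hc.trans hlen.symm))
        simp only [hsl]
        rw [if_neg (by simpa using hkey)]
        have hcast : (i : Int) + 1 = ((i + 1 : Nat) : Int) := by push_cast; ring
        rw [firstOk, dif_pos h14, if_neg hnd, hcast]
        exact partA_eq_firstOk cs (i + 1)
    · rw [if_pos (by omega)]
      rw [firstOk, dif_neg h14]
  · rw [PySem.List.pyRange_one_eq_nil (by omega)]
    rw [firstOk, dif_neg (by omega)]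
    rfl
termination_by cs.length - i
decreasing_by omega

-- lastOcc basic facts
lemma lastOcc_lt {cs : List Char} {c : Char} {j p : Nat} (h : lastOcc cs c j = some p) :
    p < j ∧ cs.getD p default = c := by
  induction j with
  | zero => simp [lastOcc] at h
  | succ j ih =>
    rw [lastOcc] at h
    split at h
    · rename_i he
      cases h
      exact ⟨Nat.lt_succ_self _, he⟩
    · have := ih h
      exact ⟨Nat.lt_succ_of_lt this.1, this.2⟩

lemma lastOcc_max {cs : List Char} {c : Char} {j p : Nat} (h : lastOcc cs c j = some p) :
    ∀ q, p < q → q < j → cs.getD q default ≠ c := by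
  induction j with
  | zero => intro q _ hq; omega
  | succ j ih =>
    intro q hpq hqj
    rw [lastOcc] at h
    split at h
    · rename_i he
      cases h
      omega
    · rename_i he
      rcases Nat.lt_succ_iff_lt_or_eq.mp hqj with hlt | rfl
      · exact ih h q hpq hlt
      · exact he

lemma lastOcc_none {cs : List Char} {c : Char} {j : Nat} (h : lastOcc cs c j = none) :
    ∀ q, q < j → cs.getD q default ≠ c := by
  induction j with
  | zero => intro q hq; omega
  | succ j ih =>
    intro q hqj
    rw [lastOcc] at h
    split at h
    · cases h
    · rename_i he
      rcases Nat.lt_succ_iff_lt_or_eq.mp hqj with hlt | rfl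
      · exact ih h q hlt
      · exact he

-- window facts; window s j = (cs.drop s).take (j - s)
lemma window_suffix {cs : List Char} {s t j : Nat} (hst : s ≤ t) (htj : t ≤ j)
    (h : ((cs.drop s).take (j - s)).Nodup) : ((cs.drop t).take (j - t)).Nodup := by
  have he : ((cs.drop s).take (j - s)).drop (t - s) = (cs.drop t).take (j - t) := by
    rw [List.drop_take, List.drop_drop]
    have h1 : s + (t - s) = t := by omega
    have h2 : j - s - (t - s) = j - t := by omega
    rw [h1, h2]
  rw [← he]
  exact (List.drop_sublist _ _).nodup h

lemma window_prefix {cs : List Char} {s : Nat} {a b : Nat} (hab : a ≤ b)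
    (h : ((cs.drop s).take b).Nodup) : ((cs.drop s).take a).Nodup := by
  have he : ((cs.drop s).take b).take a = (cs.drop s).take a := by
    rw [List.take_take, Nat.min_eq_left hab]
  rw [← he]
  exact (List.take_sublist _ _).nodup h

lemma window_extend {cs : List Char} {s j : Nat} (hsj : s ≤ j) (hj : j < cs.length) :
    (cs.drop s).take (j + 1 - s) = (cs.drop s).take (j - s) ++ [cs.getD j default] := by
  have h1 : j + 1 - s = (j - s) + 1 := by omega
  rw [h1, List.take_add_one, List.getElem?_drop]
  have h2 : s + (j - s) = j := by omega
  rw [h2, List.getElem?_eq_getElem hj, List.getD_eq_getElem cs default hj]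
  rfl

lemma mem_window_iff {cs : List Char} {s j : Nat} (hj : j ≤ cs.length) (c : Char) :
    c ∈ (cs.drop s).take (j - s) ↔ ∃ q, s ≤ q ∧ q < j ∧ cs.getD q default = c := by
  rw [List.mem_iff_getElem?]
  constructor
  · rintro ⟨k, hk⟩
    rw [List.getElem?_take] at hk
    by_cases hkj : k < j - s
    · rw [if_pos hkj, List.getElem?_drop] at hk
      obtain ⟨hlt, he⟩ := List.getElem?_eq_some_iff.mp hk
      exact ⟨s + k, by omega, by omega, by rw [List.getD_eq_getElem cs default hlt]; exact he⟩
    · rw [if_neg hkj] at hk; cases hk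
  · rintro ⟨q, hsq, hqj, hc⟩
    have hlt : q < cs.length := by omega
    refine ⟨q - s, ?_⟩
    rw [List.getElem?_take, if_pos (by omega), List.getElem?_drop]
    have h2 : s + (q - s) = q := by omega
    rw [h2, List.getElem?_eq_getElem hlt]
    rw [List.getD_eq_getElem cs default hlt] at hc
    exact congrArg some hc

lemma nodup_succ {cs : List Char} {t j : Nat} (hj : j < cs.length) (htj : t ≤ j)
    (hnd : ((cs.drop t).take (j - t)).Nodup)
    (hnotin : ∀ q, t ≤ q → q < j → cs.getD q default ≠ cs.getD j default) :
    ((cs.drop t).take (j + 1 - t)).Nodup := by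
  rw [window_extend htj hj]
  rw [List.nodup_append]
  refine ⟨hnd, List.nodup_singleton _, ?_⟩
  intro a ha b hb
  rw [List.mem_singleton] at hb
  subst hb
  intro heq
  obtain ⟨q, hq1, hq2, hq3⟩ := (mem_window_iff (Nat.le_of_lt hj) _).mp ha
  exact hnotin q hq1 hq2 (heq ▸ hq3)

lemma not_nodup_succ_of_mem {cs : List Char} {s j q : Nat} (hj : j < cs.length) (hsj : s ≤ j)
    (hs : s ≤ q) (hq : q < j) (he : cs.getD q default = cs.getD j default) :
    ¬ ((cs.drop s).take (j + 1 - s)).Nodup := by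
  rw [window_extend hsj hj, List.nodup_append]
  rintro ⟨-, -, hd⟩
  have hmem : cs.getD j default ∈ (cs.drop s).take (j - s) :=
    (mem_window_iff (Nat.le_of_lt hj) _).mpr ⟨q, hs, hq, he⟩
  exact hd _ hmem _ (List.mem_singleton.mpr rfl) rfl

lemma not_nodup_succ_of_not {cs : List Char} {s j : Nat} (hj : j < cs.length) (hsj : s ≤ j)
    (h : ¬ ((cs.drop s).take (j - s)).Nodup) :
    ¬ ((cs.drop s).take (j + 1 - s)).Nodup := by
  rw [window_extend hsj hj, List.nodup_append]
  rintro ⟨h1, -, -⟩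
  exact h h1

lemma firstOk_skip {cs : List Char} {i0 : Nat}
    (h : ∀ s, s < i0 → s + 14 ≤ cs.length ∧ ¬ ((cs.drop s).take 14).Nodup) :
    firstOk cs 0 = firstOk cs i0 := by
  induction i0 with
  | zero => rfl
  | succ i0 ih =>
    have h0 := h i0 (Nat.lt_succ_self _)
    rw [ih (fun s hs => h s (by omega))]
    rw [firstOk, dif_pos h0.1, if_neg h0.2]

lemma firstOk_neg {cs : List Char} (i : Nat)
    (h : ∀ s, i ≤ s → s + 14 ≤ cs.length → ¬ ((cs.drop s).take 14).Nodup) :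
    firstOk cs i = -1 := by
  rw [firstOk]
  split
  · rename_i h14
    rw [if_neg (h i (Nat.le_refl _) h14)]
    exact firstOk_neg (i + 1) (fun s hs h14' => h s (by omega) h14')
  · rfl
termination_by cs.length - i
decreasing_by omega

-- one step of the sliding window: the branch bodies after the new start (news) is known
lemma partB_step (cs : List Char) (fuel j start news : Nat) (lastSeen : PySem.Dict Char Int)
    (ih : ∀ (j start : Nat) (lastSeen : PySem.Dict Char Int),
      cs.length - j ≤ fuel → start ≤ j → j ≤ cs.length →
      ((cs.drop start).take (j - start)).Nodup →
      (∀ s, s < start → ¬ ((cs.drop s).take (j - s)).Nodup) →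
      (∀ s, s + 14 ≤ j → ¬ ((cs.drop s).take 14).Nodup) →
      (∀ c, PySem.Dict.get? lastSeen c = (lastOcc cs c j).map (fun p => (p : Int))) →
      part2AltLoop lastSeen (start : Int) (PySem.List.enumerate (cs.drop j) (j : Int))
        = firstOk cs 0)
    (hfuel : cs.length - j ≤ fuel + 1) (hj : j < cs.length) (hsj : start ≤ j)
    (hnd : ((cs.drop start).take (j - start)).Nodup)
    (hfail : ∀ s, s + 14 ≤ j → ¬ ((cs.drop s).take 14).Nodup)
    (hlast : ∀ c, PySem.Dict.get? lastSeen c = (lastOcc cs c j).map (fun p => (p : Int)))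
    (hge : start ≤ news) (hnj : news ≤ j)
    (hnotin : ∀ q, news ≤ q → q < j → cs.getD q default ≠ cs.getD j default)
    (hmin' : ∀ s, s < news → ¬ ((cs.drop s).take (j + 1 - s)).Nodup) :
    (if ((j : Int) - (news : Int) + 1 == 14) = true then (j : Int) + 1
     else part2AltLoop (PySem.Dict.insert lastSeen (cs.getD j default) (j : Int)) (news : Int)
            (PySem.List.enumerate (cs.drop (j + 1)) ((j : Int) + 1)))
      = firstOk cs 0 := by
  have hnd' : ((cs.drop news).take (j + 1 - news)).Nodup :=
    nodup_succ hj hnj (window_suffix hge hnj hnd) hnotin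
  have hlen13 : j - start ≤ 13 := by
    by_contra hc
    exact hfail start (by omega) (window_prefix (by omega) hnd)
  by_cases hret : j + 1 - news = 14
  · rw [if_pos (by simp only [beq_iff_eq]; omega)]
    rw [firstOk_skip (i0 := news) (fun s hs => ⟨by omega, hfail s (by omega)⟩)]
    rw [firstOk, dif_pos (by omega)]
    rw [if_pos (by rw [show (14 : Nat) = j + 1 - news from hret.symm]; exact hnd')]
    omega
  · rw [if_neg (by simp only [beq_iff_eq]; omega)]
    have hfail' : ∀ s, s + 14 ≤ j + 1 → ¬ ((cs.drop s).take 14).Nodup := by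
      intro s hs
      rcases Nat.lt_or_ge (s + 14) (j + 1) with h | h
      · exact hfail s (by omega)
      · have hsnews : s < news := by omega
        intro hcon
        apply hmin' s hsnews
        rw [show j + 1 - s = 14 by omega]
        exact hcon
    have hlast' : ∀ c, PySem.Dict.get? (PySem.Dict.insert lastSeen (cs.getD j default) (j : Int)) c
        = (lastOcc cs c (j + 1)).map (fun p => (p : Int)) := by
      intro c
      by_cases hc : c = cs.getD j default
      · subst hc
        rw [PySem.Dict.get?_insert_self, lastOcc, if_pos rfl]
        rfl
      · rw [PySem.Dict.get?_insert_of_ne _ _ hc, hlast c, lastOcc,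
          if_neg (fun he => hc he.symm)]
    rw [show ((j : Int) + 1) = (((j + 1 : Nat)) : Int) by push_cast; ring]
    exact ih (j + 1) news _ (by omega) (by omega) (by omega) hnd' hmin' hfail' hlast'

-- main sliding-window invariant
lemma partB_inv (cs : List Char) : ∀ (fuel j start : Nat) (lastSeen : PySem.Dict Char Int),
    cs.length - j ≤ fuel → start ≤ j → j ≤ cs.length →
    ((cs.drop start).take (j - start)).Nodup →
    (∀ s, s < start → ¬ ((cs.drop s).take (j - s)).Nodup) →
    (∀ s, s + 14 ≤ j → ¬ ((cs.drop s).take 14).Nodup) →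
    (∀ c, PySem.Dict.get? lastSeen c = (lastOcc cs c j).map (fun p => (p : Int))) →
    part2AltLoop lastSeen (start : Int) (PySem.List.enumerate (cs.drop j) (j : Int))
      = firstOk cs 0 := by
  intro fuel
  induction fuel with
  | zero =>
    intro j start lastSeen hfuel hsj hjn hnd hmin hfail hlast
    have hj : j = cs.length := by omega
    subst hj
    rw [List.drop_length, PySem.List.enumerate_nil, part2AltLoop]
    exact (firstOk_neg 0 (fun s _ h14 => hfail s h14)).symm
  | succ fuel ih =>
    intro j start lastSeen hfuel hsj hjn hnd hmin hfail hlast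
    by_cases hje : j = cs.length
    · subst hje
      rw [List.drop_length, PySem.List.enumerate_nil, part2AltLoop]
      exact (firstOk_neg 0 (fun s _ h14 => hfail s h14)).symm
    · have hj : j < cs.length := by omega
      have hdrop : cs.drop j = cs.getD j default :: cs.drop (j + 1) := by
        rw [List.getD_eq_getElem cs default hj]
        exact List.drop_eq_getElem_cons hj
      rw [hdrop, PySem.List.enumerate_cons, part2AltLoop, hlast (cs.getD j default)]
      cases holast : lastOcc cs (cs.getD j default) j with
      | none =>
        simp only [Option.pure_def]
        exact partB_step cs fuel j start start lastSeen ih hfuel hj hsj hnd hfail hlast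
          (Nat.le_refl _) hsj
          (fun q _ h2 => lastOcc_none holast q h2)
          (fun s hs => not_nodup_succ_of_not hj (by omega) (hmin s hs))
      | some p =>
        obtain ⟨hpj, hpc⟩ := lastOcc_lt holast
        simp only [Option.pure_def, Option.bind_eq_bind, Option.bind_some, Option.map_some]
        by_cases hps : (p : Int) ≥ (start : Int)
        · rw [if_pos hps]
          have hps' : start ≤ p := by exact_mod_cast hps
          rw [show ((p : Int) + 1) = (((p + 1 : Nat)) : Int) by push_cast; ring]
          exact partB_step cs fuel j start (p + 1) lastSeen ih hfuel hj hsj hnd hfail hlast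
            (by omega) (by omega)
            (fun q h1 h2 => lastOcc_max holast q (by omega) h2)
            (fun s hs => by
              rcases Nat.lt_or_ge s start with h | h
              · exact not_nodup_succ_of_not hj (by omega) (hmin s h)
              · exact not_nodup_succ_of_mem hj (by omega) (show s ≤ p by omega) hpj hpc)
        · rw [if_neg hps]
          have hps' : p < start := by omega
          exact partB_step cs fuel j start start lastSeen ih hfuel hj hsj hnd hfail hlast
            (Nat.le_refl _) hsj
            (fun q h1 h2 => lastOcc_max holast q (by omega) h2)
            (fun s hs => not_nodup_succ_of_not hj (by omega) (hmin s hs))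

lemma part2_eq_alt (s : String) : part2 s = part2_alt s := by
  simp only [part2, part2_alt, PySem.Str.len_eq]
  by_cases h14 : s.toList.length < 14
  · rw [if_pos (by exact_mod_cast h14)]
    rw [show ((0 : Int)) = ((0 : Nat) : Int) from rfl, partA_eq_firstOk s.toList 0,
      firstOk, dif_neg (by omega)]
  · rw [if_neg (by omega)]
    rw [show ((0 : Int)) = ((0 : Nat) : Int) from rfl, partA_eq_firstOk s.toList 0]
    have h := partB_inv s.toList s.toList.length 0 0 PySem.Dict.empty (by omega)
      (Nat.le_refl _) (by omega) (by simp)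
      (fun s hs => absurd hs (Nat.not_lt_zero s))
      (fun s hs => absurd hs (by omega))
      (fun c => rfl)
    rw [List.drop_zero] at h
    exact h.symm

-- ===== VERDICT (by name: the statement is the Claim_ definition above) =====
theorem part2_spec : Claim_equal_part2 := by
  intro s _
  unfold Spec_part2
  exact part2_eq_alt s
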